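-- pv_equiv track=rewrite | github.com/JoasGomes/cursopython | aula25/aula25.py | encontra_primeiro_duplicado
-- ===== SOURCE A (Python) =====
-- def encontra_primeiro_duplicado(param_lista_de_inteiros):
--     numeros_checados = set()
--     primeiro_duplicado = -1
--
--     for numero in param_lista_de_inteiros:
--         if numero in numeros_checados:
--             primeiro_duplicado = numero
--             break
--
--         numeros_checados.add(numero)
--
--     return primeiro_duplicado
-- ===== SOURCE B (Python) =====
-- def segundo_indice(param_lista_de_inteiros, valor):
--     primeiro = param_lista_de_inteiros.index(valor)
--     return primeiro + 1 + param_lista_de_inteiros[primeiro + 1:].index(valor)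
--
--
-- def encontra_primeiro_duplicado(param_lista_de_inteiros):
--     melhor_indice = None
--     melhor_valor = -1
--     for valor in dict.fromkeys(param_lista_de_inteiros):
--         if param_lista_de_inteiros.count(valor) > 1:
--             segundo = segundo_indice(param_lista_de_inteiros, valor)
--             if melhor_indice is None or segundo < melhor_indice:
--                 melhor_indice, melhor_valor = segundo, valor
--     return melhor_valor
-- ===== Notes on version B (the rewrite author's own statement) =====
-- stated objective: alternative
-- what changed: Instead of A's single left-to-right scan with a seen-set and break, B computes for each distinct value (via dict.fromkeys) its second-occurrence index using count/index/slice, and returns the value whose second occurrence is earliest (min over staged per-value passes), -1 if no value repeats.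
import Mathlib
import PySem

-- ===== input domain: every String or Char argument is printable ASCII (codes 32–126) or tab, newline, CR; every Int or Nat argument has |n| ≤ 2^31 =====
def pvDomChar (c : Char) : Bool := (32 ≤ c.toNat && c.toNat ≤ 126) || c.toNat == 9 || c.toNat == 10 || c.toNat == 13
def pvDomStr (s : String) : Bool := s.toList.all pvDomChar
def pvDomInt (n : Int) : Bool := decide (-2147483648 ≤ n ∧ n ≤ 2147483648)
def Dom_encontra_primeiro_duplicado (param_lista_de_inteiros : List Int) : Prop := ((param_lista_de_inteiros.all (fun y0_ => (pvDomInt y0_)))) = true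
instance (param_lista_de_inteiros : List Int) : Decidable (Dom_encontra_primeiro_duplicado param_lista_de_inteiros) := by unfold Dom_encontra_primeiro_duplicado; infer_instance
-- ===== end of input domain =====

-- B replaces A's seen-set scan-with-break by a staged min over per-value second-occurrence indices (alternative algorithm, not faster).


-- ===== PORT A =====
-- A's loop with a seen-set and break, transliterated as structural recursion carrying the set
def goA_encontra : PySem.Set Int → List Int → Int
  | _, [] => -1
  | seen, numero :: rest =>
      if PySem.Set.contains seen numero then numero
      else goA_encontra (PySem.Set.add seen numero) rest

def encontra_primeiro_duplicado (param_lista_de_inteiros : List Int) : Int :=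
  goA_encontra PySem.Set.empty param_lista_de_inteiros

-- ===== PORT B =====
-- helper: index of the second occurrence of valor (callers guard count > 1, so Python's .index finds a hit; getD 0 is never the raising case there)
def segundo_indice (param_lista_de_inteiros : List Int) (valor : Int) : Int :=
  let primeiro := (PySem.List.index? param_lista_de_inteiros valor).getD 0
  (primeiro : Int) + 1 +
    (((PySem.List.index? (PySem.List.slice param_lista_de_inteiros (some ((primeiro + 1 : Nat) : Int)) none) valor).getD 0 : Nat) : Int)

-- body of B's for-loop over dict.fromkeys(xs): state (melhor_indice, melhor_valor)
def passoB (param_lista_de_inteiros : List Int) (st : Option Int × Int) (valor : Int) : Option Int × Int :=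
  if 1 < PySem.List.count param_lista_de_inteiros valor then
    let segundo := segundo_indice param_lista_de_inteiros valor
    match st.1 with
    | none => (some segundo, valor)
    | some b => if segundo < b then (some segundo, valor) else st
  else st

def encontra_primeiro_duplicado_alt (param_lista_de_inteiros : List Int) : Int :=
  ((PySem.List.dedup param_lista_de_inteiros).foldl (passoB param_lista_de_inteiros) (none, -1)).2

-- ===== PRECONDITION & SPEC =====
def Spec_encontra_primeiro_duplicado (param_lista_de_inteiros : List Int) (out : Int) : Prop := out = encontra_primeiro_duplicado_alt param_lista_de_inteiros
instance (param_lista_de_inteiros : List Int) (out : Int) : Decidable (Spec_encontra_primeiro_duplicado param_lista_de_inteiros out) := by unfold Spec_encontra_primeiro_duplicado; infer_instance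

-- ===== CLAIM (what is proved, stated in full; the proofs are below) =====
def Claim_equal_encontra_primeiro_duplicado : Prop := ∀ (param_lista_de_inteiros : List Int), Dom_encontra_primeiro_duplicado param_lista_de_inteiros → Spec_encontra_primeiro_duplicado param_lista_de_inteiros (encontra_primeiro_duplicado param_lista_de_inteiros)

-- ===== LEMMAS AND PROOFS =====

-- A on a duplicate-free remainder returns -1
theorem goA_nodup (pre rest : List Int) (h : (pre ++ rest).Nodup) :
    goA_encontra (PySem.Set.ofList pre) rest = -1 := by
  induction rest generalizing pre with
  | nil => simp [goA_encontra]
  | cons x r ih =>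
      have hx : x ∉ pre := by
        have := List.disjoint_of_nodup_append h
        exact fun hm => this hm (.head _)
      have hadd : PySem.Set.add (PySem.Set.ofList pre) x = PySem.Set.ofList (pre ++ [x]) := by
        simp [PySem.Set.ofList_eq_foldl, List.foldl_append]
      have hn : ((pre ++ [x]) ++ r).Nodup := by simpa using h
      simp only [goA_encontra, PySem.Set.contains_eq_listContains, List.contains_eq_mem,
        PySem.Set.mem_ofList, decide_eq_true_eq]
      rw [if_neg hx, hadd, ih _ hn]

-- running A from position k up to the least duplicate position j returns xs[j]
theorem goA_run (xs : List Int) (j : Nat) (hjl : j < xs.length) (hjd : xs[j] ∈ xs.take j)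
    (hmin : ∀ i, i < j → ∀ hi : i < xs.length, xs[i] ∉ xs.take i) :
    ∀ n k, j = k + n → goA_encontra (PySem.Set.ofList (xs.take k)) (xs.drop k) = xs[j] := by
  intro n
  induction n with
  | zero =>
      intro k hk
      have hjk : j = k := by omega
      subst hjk
      rw [List.drop_eq_getElem_cons hjl]
      simp only [goA_encontra, PySem.Set.contains_eq_listContains, List.contains_eq_mem,
        PySem.Set.mem_ofList, decide_eq_true_eq]
      rw [if_pos hjd]
  | succ n ih =>
      intro k hk
      have hkj : k < j := by omega
      have hkl : k < xs.length := by omega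
      rw [List.drop_eq_getElem_cons hkl]
      simp only [goA_encontra, PySem.Set.contains_eq_listContains, List.contains_eq_mem,
        PySem.Set.mem_ofList, decide_eq_true_eq]
      rw [if_neg (hmin k hkj hkl)]
      have hadd : PySem.Set.add (PySem.Set.ofList (xs.take k)) xs[k]
          = PySem.Set.ofList (xs.take (k + 1)) := by
        rw [List.take_succ_eq_append_getElem hkl, PySem.Set.ofList_eq_foldl,
          PySem.Set.ofList_eq_foldl, List.foldl_append]
        rfl
      rw [hadd, ih (k + 1) (by omega)]

-- a value seen in its own strict prefix has two occurrences
theorem count_two_of_mem_take (xs : List Int) (j : Nat) (hj : j < xs.length)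
    (hm : xs[j] ∈ xs.take j) : 1 < xs.count xs[j] := by
  have h1 : 0 < (xs.take j).count xs[j] := List.count_pos_iff.mpr hm
  have h2 : 0 < (xs.drop j).count xs[j] := by
    refine List.count_pos_iff.mpr ?_
    rw [List.drop_eq_getElem_cons hj]
    exact .head _
  have h3 : xs.count xs[j] = (xs.take j).count xs[j] + (xs.drop j).count xs[j] := by
    rw [← List.count_append, List.take_append_drop]
  omega

-- characterisation of segundo_indice for a repeated value: it is the least duplicate position of that value
theorem segundo_spec (xs : List Int) (x : Int) (hc : 1 < xs.count x) :
    ∃ s : Nat, segundo_indice xs x = (s : Int) ∧ ∃ hs : s < xs.length, xs[s] = x ∧ x ∈ xs.take s ∧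
      ∀ i, (hi : i < xs.length) → xs[i] = x → x ∈ xs.take i → s ≤ i := by
  have hmem : x ∈ xs := List.count_pos_iff.mp (by omega)
  obtain ⟨p, hp⟩ := Option.isSome_iff_exists.mp ((PySem.List.index?_isSome_iff xs x).mpr hmem)
  obtain ⟨hpl, hpe, hpmin⟩ := PySem.List.getElem_of_index?_eq_some hp
  have hcnt : xs.count x = (xs.take (p + 1)).count x + (xs.drop (p + 1)).count x := by
    rw [← List.count_append, List.take_append_drop]
  have htk : (xs.take (p + 1)).count x = 1 := by
    rw [List.take_succ_eq_append_getElem hpl, List.count_append]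
    have h0 : (xs.take p).count x = 0 := by
      rw [List.count_eq_zero]
      intro hmm
      obtain ⟨k, hk, he⟩ := List.getElem_of_mem hmm
      have hk' : k < p := by simp at hk; omega
      exact hpmin k hk' (by rw [← List.getElem_take (xs := xs)]; exact he)
    simp [h0, hpe]
  have hxt : x ∈ xs.drop (p + 1) := by
    by_contra hxe
    have : (xs.drop (p + 1)).count x = 0 := List.count_eq_zero.mpr hxe
    omega
  obtain ⟨q, hq⟩ := Option.isSome_iff_exists.mp
    ((PySem.List.index?_isSome_iff (xs.drop (p + 1)) x).mpr hxt)
  obtain ⟨hql, hqe, hqmin⟩ := PySem.List.getElem_of_index?_eq_some hq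
  have hql' : p + 1 + q < xs.length := by
    have := hql; simp at this; omega
  refine ⟨p + 1 + q, ?_, hql', ?_, ?_, ?_⟩
  · simp only [segundo_indice, hp, Option.getD_some, PySem.List.slice_from_natCast, hq]
    push_cast; ring
  · have h := hqe
    rw [List.getElem_drop] at h
    exact h
  · have : (xs.take (p + 1 + q))[p]'(by simp; omega) = x := by
      rw [List.getElem_take]; exact hpe
    exact this ▸ List.getElem_mem _
  · intro i hi hie hitake
    obtain ⟨k, hk, he⟩ := List.getElem_of_mem hitake
    have hkl : k < i ∧ k < xs.length := by simp at hk; omega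
    have hxk : xs[k]'hkl.2 = x := by rw [← List.getElem_take (xs := xs)]; exact he
    have hpk : p ≤ k := by
      by_contra hlt
      exact hpmin k (by omega) hxk
    have hpi : p + 1 ≤ i := by omega
    have hti : (xs.drop (p + 1))[i - (p + 1)]'(by simp; omega) = x := by
      rw [List.getElem_drop]
      convert hie using 2
      omega
    have : q ≤ i - (p + 1) := by
      by_contra hlt
      exact hqmin (i - (p + 1)) (by omega) hti
    omega

-- B's fold ignores values that do not repeat
theorem foldB_keep (xs : List Int) (l : List Int) (st : Option Int × Int)
    (h : ∀ x ∈ l, ¬ 1 < xs.count x) :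
    l.foldl (passoB xs) st = st := by
  induction l generalizing st with
  | nil => rfl
  | cons x r ih =>
      have hx : ¬ 1 < PySem.List.count xs x := by
        simpa [PySem.List.count_eq] using h x (.head _)
      simp only [List.foldl_cons, passoB, if_neg hx]
      exact ih st fun y hy => h y (.tail _ hy)

-- invariant through values whose second occurrence is strictly later than j
theorem foldB_gt (xs : List Int) (j : Nat) (l : List Int)
    (h : ∀ x ∈ l, 1 < xs.count x → (j : Int) < segundo_indice xs x) :
    ∀ st : Option Int × Int, (st = (none, -1) ∨ ∃ b, st.1 = some b ∧ (j : Int) < b) →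
      (l.foldl (passoB xs) st = (none, -1) ∨
        ∃ b, (l.foldl (passoB xs) st).1 = some b ∧ (j : Int) < b) := by
  induction l with
  | nil => intro st hst; exact hst
  | cons x r ih =>
      intro st hst
      have hr : ∀ y ∈ r, 1 < xs.count y → (j : Int) < segundo_indice xs y :=
        fun y hy => h y (.tail _ hy)
      simp only [List.foldl_cons]
      by_cases hc : 1 < PySem.List.count xs x
      · have hc' : 1 < xs.count x := by simpa [PySem.List.count_eq] using hc
        have hgt := h x (.head _) hc'
        rcases hst with hst | ⟨b, hb, hjb⟩
        · subst hst
          simp only [passoB, if_pos hc]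
          exact ih hr _ (Or.inr ⟨_, rfl, hgt⟩)
        · have : passoB xs st x = (some (segundo_indice xs x), x) ∨ passoB xs st x = st := by
            simp only [passoB, if_pos hc, hb]
            split_ifs <;> simp
          rcases this with he | he
          · rw [he]; exact ih hr _ (Or.inr ⟨_, rfl, hgt⟩)
          · rw [he]; exact ih hr _ (Or.inr ⟨b, hb, hjb⟩)
      · simp only [passoB, if_neg hc]
        exact ih hr st hst
-- once (some j, v) is reached, no later value with a ≥ j second occurrence displaces it
theorem foldB_ge (xs : List Int) (j : Nat) (v : Int) (l : List Int)
    (h : ∀ x ∈ l, 1 < xs.count x → (j : Int) ≤ segundo_indice xs x) :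
    l.foldl (passoB xs) (some (j : Int), v) = (some (j : Int), v) := by
  induction l with
  | nil => rfl
  | cons x r ih =>
      simp only [List.foldl_cons]
      by_cases hc : 1 < PySem.List.count xs x
      · have hc' : 1 < xs.count x := by simpa [PySem.List.count_eq] using hc
        have hle := h x (.head _) hc'
        have : passoB xs (some (j : Int), v) x = (some (j : Int), v) := by
          simp only [passoB, if_pos hc]
          rw [if_neg (by omega)]
        rw [this]
        exact ih fun y hy => h y (.tail _ hy)
      · simp only [passoB, if_neg hc]
        exact ih fun y hy => h y (.tail _ hy)

-- a non-Nodup list has a position whose value already occurred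
theorem exists_dup_pos (xs : List Int) (h : ¬ xs.Nodup) :
    ∃ j, ∃ hj : j < xs.length, xs[j] ∈ xs.take j := by
  induction xs with
  | nil => exact absurd List.nodup_nil h
  | cons x t ih =>
      by_cases hx : x ∈ t
      · obtain ⟨k, hk, he⟩ := List.getElem_of_mem hx
        refine ⟨k + 1, by simp; omega, ?_⟩
        simp only [List.getElem_cons_succ, he, List.take_succ_cons]
        exact .head _
      · have ht : ¬ t.Nodup := fun hn => h (List.nodup_cons.mpr ⟨hx, hn⟩)
        obtain ⟨j, hj, hm⟩ := ih ht
        refine ⟨j + 1, by simpa using Nat.succ_lt_succ hj, ?_⟩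
        simpa [List.take_succ_cons] using Or.inr hm

-- ===== VERDICT (by name: the statement is the Claim_ definition above) =====
theorem encontra_primeiro_duplicado_spec : Claim_equal_encontra_primeiro_duplicado := by
  intro xs _
  unfold Spec_encontra_primeiro_duplicado encontra_primeiro_duplicado encontra_primeiro_duplicado_alt
  by_cases hnd : xs.Nodup
  · rw [foldB_keep xs _ _ (by
      intro x _
      have := List.nodup_iff_count_le_one.mp hnd x
      omega)]
    have := goA_nodup [] xs (by simpa using hnd)
    simpa [PySem.Set.empty] using this
  · obtain ⟨j0, hj0, hm0⟩ := exists_dup_pos xs hnd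
    have hP : ∃ j, j < xs.length ∧ xs.getD j 0 ∈ xs.take j := ⟨j0, hj0, by rwa [List.getD_eq_getElem xs 0 hj0]⟩
    classical
    let j := Nat.find hP
    obtain ⟨hjl, hjm'⟩ := Nat.find_spec hP
    have hjm : xs[j] ∈ xs.take j := by rwa [List.getD_eq_getElem xs 0 hjl] at hjm'
    have hmin : ∀ i, i < j → ∀ hi : i < xs.length, xs[i] ∉ xs.take i := by
      intro i hij hi hmem
      exact Nat.find_min hP hij ⟨hi, by rwa [List.getD_eq_getElem xs 0 hi]⟩
    -- A returns xs[j]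
    have hA : goA_encontra PySem.Set.empty xs = xs[j] := by
      have := goA_run xs j hjl hjm hmin j 0 (by omega)
      simpa [PySem.Set.empty] using this
    -- facts about second occurrences relative to j
    have hcj : 1 < xs.count xs[j] := count_two_of_mem_take xs j hjl hjm
    have hkey : ∀ x : Int, 1 < xs.count x →
        ((j : Int) ≤ segundo_indice xs x ∧ (segundo_indice xs x = (j : Int) → x = xs[j])) := by
      intro x hx
      obtain ⟨s, hse, hsl, hsv, hstk, _⟩ := segundo_spec xs x hx
      have hjs : j ≤ s := by
        by_contra hlt
        exact hmin s (by omega) hsl (hsv ▸ hstk)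
      constructor
      · rw [hse]; exact_mod_cast hjs
      · intro he
        have hsjj : s = j := by rw [hse] at he; exact_mod_cast he
        subst hsjj
        exact hsv.symm
    have hsj : segundo_indice xs xs[j] = (j : Int) := by
      obtain ⟨s, hse, hsl, hsv, hstk, hsmin⟩ := segundo_spec xs xs[j] hcj
      have h1 : j ≤ s := by
        by_contra hlt
        exact hmin s (by omega) hsl (hsv ▸ hstk)
      have h2 : s ≤ j := hsmin j hjl rfl hjm
      rw [hse]; congr 1; omega
    -- split dedup xs around xs[j]
    have hmemd : xs[j] ∈ PySem.List.dedup xs := by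
      rw [PySem.List.mem_dedup]; exact List.getElem_mem _
    obtain ⟨l1, l2, hsplit⟩ := List.append_of_mem hmemd
    have hnodupd : (PySem.List.dedup xs).Nodup := by
      rw [PySem.List.dedup_eq_ofList]; exact PySem.Set.nodup_ofList xs
    rw [hsplit] at hnodupd
    have hnotin1 : xs[j] ∉ l1 := by
      have := List.disjoint_of_nodup_append hnodupd
      exact fun hm => this hm (.head _)
    have hnotin2 : xs[j] ∉ l2 := by
      have := (List.nodup_append.mp hnodupd).2.1
      exact (List.nodup_cons.mp this).1
    rw [hsplit, List.foldl_append, List.foldl_cons]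
    -- through l1 the state stays none or strictly greater than j
    have hst1 := foldB_gt xs j l1
      (by
        intro x hx1 hcx
        rcases (hkey x hcx) with ⟨hle, heq⟩
        rcases lt_or_eq_of_le hle with h | h
        · exact h
        · exact absurd (heq h.symm) (by rintro rfl; exact hnotin1 hx1))
      (none, -1) (Or.inl rfl)
    -- processing xs[j] lands on (some j, xs[j])
    have hstep : passoB xs (l1.foldl (passoB xs) (none, -1)) xs[j] = (some (j : Int), xs[j]) := by
      have hc' : 1 < PySem.List.count xs xs[j] := by simpa [PySem.List.count_eq] using hcj
      rcases hst1 with he | ⟨b, hb, hjb⟩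
      · rw [he]; unfold passoB; rw [if_pos hc']; simp [hsj]
      · rcases hfold : List.foldl (passoB xs) (none, -1) l1 with ⟨o, v⟩
        rw [hfold] at hb
        obtain rfl : o = some b := hb
        unfold passoB; rw [if_pos hc']
        simp only [hsj]
        rw [if_pos hjb]
    rw [hstep, foldB_ge xs j xs[j] l2 (fun x hx2 hcx => (hkey x hcx).1), hA]
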